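-- pv_equiv track=rewrite | github.com/nyh10063/hantalk_rule_example_auto | src/apply_first_pass_review.py | _build_output_columns
-- ===== SOURCE A (Python) =====
-- def _build_output_columns(input_columns: list[str]) -> list[str]:
--     review_columns = [
--         "human_label",
--         "span_status",
--         "codex_review_label",
--         "regex_match_text",
--         "a_token_left",
--         "two_tokens_right",
--         "codex_review_span_status",
--         "codex_review_reason",
--         "codex_review_note",
--     ]
--     generated_columns = set(review_columns) | {"regex_with_context", "a_token_right"}
--     columns = [column for column in input_columns if column not in generated_columns]
--     if "raw_text" in columns:
--         insert_at = columns.index("raw_text") + 1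
--         columns = columns[:insert_at] + ["regex_with_context"] + columns[insert_at:]
--         return columns[: insert_at + 1] + review_columns + columns[insert_at + 1 :]
--     return ["regex_with_context"] + review_columns + columns
-- ===== SOURCE B (Python) =====
-- def _build_output_columns(input_columns: list[str]) -> list[str]:
--     review_columns = [
--         "human_label",
--         "span_status",
--         "codex_review_label",
--         "regex_match_text",
--         "a_token_left",
--         "two_tokens_right",
--         "codex_review_span_status",
--         "codex_review_reason",
--         "codex_review_note",
--     ]
--     skip = set(review_columns) | {"regex_with_context", "a_token_right"}
--     result = []
--     placed = False
--     for column in input_columns: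
--         if column in skip:
--             continue
--         result.append(column)
--         if not placed and column == "raw_text":
--             result.append("regex_with_context")
--             result.extend(review_columns)
--             placed = True
--     if placed:
--         return result
--     return ["regex_with_context"] + review_columns + result
-- ===== Notes on version B (the rewrite author's own statement) =====
-- stated objective: simpler
-- what changed: Replaces the filter-then-index-then-double-splice with one forward pass that skips generated columns and fuses the insertion in right after the first 'raw_text' (a placed flag), prepending the inserted block only if no 'raw_text' was seen.
import Mathlib
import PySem

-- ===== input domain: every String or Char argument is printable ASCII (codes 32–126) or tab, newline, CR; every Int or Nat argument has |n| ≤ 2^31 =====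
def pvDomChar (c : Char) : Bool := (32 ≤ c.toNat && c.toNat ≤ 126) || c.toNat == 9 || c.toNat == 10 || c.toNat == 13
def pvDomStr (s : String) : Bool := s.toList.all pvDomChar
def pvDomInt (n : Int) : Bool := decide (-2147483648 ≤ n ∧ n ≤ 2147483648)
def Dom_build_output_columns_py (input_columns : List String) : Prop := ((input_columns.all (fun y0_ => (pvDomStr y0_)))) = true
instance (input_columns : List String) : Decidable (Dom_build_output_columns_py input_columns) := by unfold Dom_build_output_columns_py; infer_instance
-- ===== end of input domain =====

-- B replaces A's filter-then-index-then-double-splice with a single forward pass that fuses the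
-- insertion after the first 'raw_text' (a 'placed' flag) — simpler decomposition, same O(n) cost.


-- ===== PORT A =====
def build_output_columns_py (input_columns : List String) : List String :=
  let review_columns : List String :=
    ["human_label", "span_status", "codex_review_label", "regex_match_text", "a_token_left",
     "two_tokens_right", "codex_review_span_status", "codex_review_reason", "codex_review_note"]
  let generated_columns : PySem.Set String :=
    PySem.Set.union (PySem.Set.ofList review_columns) ["regex_with_context", "a_token_right"]
  let columns := input_columns.filter (fun column => !(PySem.Set.contains generated_columns column))
  if "raw_text" ∈ columns then
    let insert_at : Int := ((PySem.List.index? columns "raw_text").getD 0 : Nat) + 1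
    let columns2 := PySem.List.slice columns none (some insert_at) ++ ["regex_with_context"]
      ++ PySem.List.slice columns (some insert_at) none
    PySem.List.slice columns2 none (some (insert_at + 1)) ++ review_columns
      ++ PySem.List.slice columns2 (some (insert_at + 1)) none
  else
    ["regex_with_context"] ++ review_columns ++ columns

-- ===== PORT B =====
-- the for-loop of Source B: state = (result, placed)
def pvAltLoop (review_columns : List String) (skip : PySem.Set String) :
    List String → List String × Bool → List String × Bool
  | [], st => st
  | column :: rest, (result, placed) =>
    if PySem.Set.contains skip column then
      pvAltLoop review_columns skip rest (result, placed)
    else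
      let result := result ++ [column]
      if !placed && column == "raw_text" then
        pvAltLoop review_columns skip rest
          (result ++ ["regex_with_context"] ++ review_columns, true)
      else
        pvAltLoop review_columns skip rest (result, placed)

def build_output_columns_py_alt (input_columns : List String) : List String :=
  let review_columns : List String :=
    ["human_label", "span_status", "codex_review_label", "regex_match_text", "a_token_left",
     "two_tokens_right", "codex_review_span_status", "codex_review_reason", "codex_review_note"]
  let skip : PySem.Set String :=
    PySem.Set.union (PySem.Set.ofList review_columns) ["regex_with_context", "a_token_right"]
  let st := pvAltLoop review_columns skip input_columns ([], false)
  if st.2 then st.1 else ["regex_with_context"] ++ review_columns ++ st.1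

-- ===== PRECONDITION & SPEC =====
def Spec_build_output_columns_py (input_columns : List String) (out : List String) : Prop := out = build_output_columns_py_alt input_columns
instance (input_columns : List String) (out : List String) : Decidable (Spec_build_output_columns_py input_columns out) := by unfold Spec_build_output_columns_py; infer_instance

-- ===== CLAIM (what is proved, stated in full; the proofs are below) =====
def Claim_equal_build_output_columns_py : Prop := ∀ (input_columns : List String), Dom_build_output_columns_py input_columns → Spec_build_output_columns_py input_columns (build_output_columns_py input_columns)

-- ===== LEMMAS AND PROOFS =====

-- once placed, the loop just appends the kept columns
theorem pvAltLoop_true (rev : List String) (S : PySem.Set String) :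
    ∀ (l res : List String),
      pvAltLoop rev S l (res, true) = (res ++ l.filter (fun c => !(PySem.Set.contains S c)), true) := by
  intro l
  induction l with
  | nil => intro res; simp [pvAltLoop]
  | cons c t ih =>
    intro res
    by_cases hc : PySem.Set.contains S c = true
    · have hc' : c ∈ S := by simpa using hc
      simp [pvAltLoop, hc', ih]
    · simp only [Bool.not_eq_true] at hc
      have hc' : c ∉ S := by simpa using hc
      simp [pvAltLoop, hc', ih]

theorem pvAltLoop_false_notmem (rev : List String) (S : PySem.Set String) :
    ∀ (l res : List String),
      "raw_text" ∉ l.filter (fun c => !(PySem.Set.contains S c)) →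
      pvAltLoop rev S l (res, false) = (res ++ l.filter (fun c => !(PySem.Set.contains S c)), false) := by
  intro l
  induction l with
  | nil => intro res _; simp [pvAltLoop]
  | cons c t ih =>
    intro res h
    by_cases hc : PySem.Set.contains S c = true
    · simp only [List.filter_cons, hc, Bool.not_true, Bool.false_eq_true, if_false] at h ⊢
      have hc' : c ∈ S := by simpa using hc
      simp [pvAltLoop, hc', ih _ h]
    · simp only [Bool.not_eq_true] at hc
      simp only [List.filter_cons, hc, Bool.not_false, if_true, List.mem_cons] at h ⊢
      push Not at h
      obtain ⟨hcr, hm⟩ := h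
      have hc' : c ∉ S := by simpa using hc
      simp [pvAltLoop, hc', (by simpa using Ne.symm hcr : (c == "raw_text") = false), ih _ hm]

theorem pvAltLoop_false_mem (rev : List String) (S : PySem.Set String) :
    ∀ (l res pre suf : List String),
      l.filter (fun c => !(PySem.Set.contains S c)) = pre ++ "raw_text" :: suf →
      "raw_text" ∉ pre →
      pvAltLoop rev S l (res, false) =
        (res ++ pre ++ ["raw_text", "regex_with_context"] ++ rev ++ suf, true) := by
  intro l
  induction l with
  | nil =>
    intro res pre suf h _
    exact absurd h (by simp)
  | cons c t ih =>
    intro res pre suf h hpre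
    by_cases hc : PySem.Set.contains S c = true
    · simp only [List.filter_cons, hc, Bool.not_true, Bool.false_eq_true, if_false] at h
      have hc' : c ∈ S := by simpa using hc
      simp [pvAltLoop, hc', ih _ _ _ h hpre]
    · simp only [Bool.not_eq_true] at hc
      simp only [List.filter_cons, hc, Bool.not_false, if_true] at h
      have hc' : c ∉ S := by simpa using hc
      by_cases hcr : c = "raw_text"
      · subst hcr
        cases pre with
        | cons p ps =>
          have hp : p = "raw_text" := by
            have := congrArg List.headI h
            simpa using this.symm
          exact absurd (hp ▸ List.mem_cons_self) hpre
        | nil =>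
          have hsuf : t.filter (fun c => !(PySem.Set.contains S c)) = suf := by
            simpa using h
          have hsuf' : t.filter (fun c => !decide (c ∈ S)) = suf := by
            simpa using hsuf
          simp [pvAltLoop, hc', pvAltLoop_true, hsuf']
      · cases pre with
        | nil =>
          exact absurd (by simpa using congrArg List.headI h) hcr
        | cons p ps =>
          have hp : c = p := by simpa using congrArg List.headI h
          subst hp
          have ht : t.filter (fun c => !(PySem.Set.contains S c)) = ps ++ "raw_text" :: suf := by
            simpa using h
          have hps : "raw_text" ∉ ps := fun hx => hpre (List.mem_cons_of_mem _ hx)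
          simp [pvAltLoop, hc', (by simpa using hcr : (c == "raw_text") = false), ih _ _ _ ht hps]

-- ===== VERDICT (by name: the statement is the Claim_ definition above) =====
theorem build_output_columns_py_spec : Claim_equal_build_output_columns_py := by
  intro input_columns _
  unfold Spec_build_output_columns_py build_output_columns_py build_output_columns_py_alt
  simp only []
  set rev : List String :=
    ["human_label", "span_status", "codex_review_label", "regex_match_text", "a_token_left",
     "two_tokens_right", "codex_review_span_status", "codex_review_reason", "codex_review_note"] with hrev
  set S : PySem.Set String :=
    PySem.Set.union (PySem.Set.ofList rev) ["regex_with_context", "a_token_right"] with hS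
  set columns := input_columns.filter (fun column => !(PySem.Set.contains S column)) with hcols
  by_cases hmem : "raw_text" ∈ columns
  · have hsome : (PySem.List.index? columns "raw_text").isSome := by
      rw [PySem.List.index?_isSome_iff]; exact hmem
    obtain ⟨k, hk⟩ := Option.isSome_iff_exists.mp hsome
    obtain ⟨pre, suf, hsplit, hlen, hpre⟩ := (PySem.List.index?_eq_some_iff columns "raw_text" k).mp hk
    rw [if_pos hmem, hk]
    rw [pvAltLoop_false_mem rev S input_columns [] pre suf (hcols ▸ hsplit) hpre]
    simp only [Option.getD_some]
    rw [PySem.List.slice_to columns (b := (k : Int) + 1) (by omega),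
        PySem.List.slice_from columns (a := (k : Int) + 1) (by omega)]
    set columns2 := List.take ((k : Int) + 1).toNat columns ++ ["regex_with_context"] ++
      List.drop ((k : Int) + 1).toNat columns with hcols2
    rw [PySem.List.slice_to columns2 (b := (k : Int) + 1 + 1) (by omega),
        PySem.List.slice_from columns2 (a := (k : Int) + 1 + 1) (by omega)]
    have h1 : ((k : Int) + 1).toNat = k + 1 := by omega
    have h2 : ((k : Int) + 1 + 1).toNat = k + 2 := by omega
    rw [hcols2, h1, h2, hsplit]
    subst hlen
    have htake : List.take (pre.length + 1) (pre ++ "raw_text" :: suf) = pre ++ ["raw_text"] := by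
      simp [List.take_append]
    have hdrop : List.drop (pre.length + 1) (pre ++ "raw_text" :: suf) = suf := by
      simp [List.drop_append]
    rw [htake, hdrop]
    simp [List.take_append, List.drop_append,
      List.take_of_length_le (by omega : pre.length ≤ pre.length + 2),
      List.drop_eq_nil_of_le (by omega : pre.length ≤ pre.length + 2)]
  · rw [if_neg hmem,
        pvAltLoop_false_notmem rev S input_columns [] (hcols ▸ hmem)]
    rw [hcols]
    simp
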